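-- pv_equiv track=rewrite | github.com/marcelolimagomes/mg_crypto_trader | src/utils.py | remove_cols_for_klines
-- ===== SOURCE A (Python) =====
-- def remove_cols_for_klines(columns):
--     cols_to_remove = ['symbol', 'rsi']
--     for col in columns:
--         if col.startswith('ema'):
--             cols_to_remove.append(col)
--     for col in cols_to_remove:
--         if col in columns:
--             columns.remove(col)
--     return columns
-- ===== SOURCE B (Python) =====
-- def remove_cols_for_klines(columns):
--     removed_symbol = False
--     removed_rsi = False
--     result = []
--     for col in columns:
--         if col.startswith('ema'):
--             continue
--         if col == 'symbol' and not removed_symbol: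
--             removed_symbol = True
--             continue
--         if col == 'rsi' and not removed_rsi:
--             removed_rsi = True
--             continue
--         result.append(col)
--     columns[:] = result
--     return columns
-- ===== Notes on version B (the rewrite author's own statement) =====
-- stated objective: alternative
-- what changed: Replaces A's build-a-removal-list-then-repeated-membership-test-and-list.remove passes with a single stateful pass keeping two 'already removed' flags for 'symbol'/'rsi' and skipping every 'ema*' element, writing the result back in place.
import Mathlib
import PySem

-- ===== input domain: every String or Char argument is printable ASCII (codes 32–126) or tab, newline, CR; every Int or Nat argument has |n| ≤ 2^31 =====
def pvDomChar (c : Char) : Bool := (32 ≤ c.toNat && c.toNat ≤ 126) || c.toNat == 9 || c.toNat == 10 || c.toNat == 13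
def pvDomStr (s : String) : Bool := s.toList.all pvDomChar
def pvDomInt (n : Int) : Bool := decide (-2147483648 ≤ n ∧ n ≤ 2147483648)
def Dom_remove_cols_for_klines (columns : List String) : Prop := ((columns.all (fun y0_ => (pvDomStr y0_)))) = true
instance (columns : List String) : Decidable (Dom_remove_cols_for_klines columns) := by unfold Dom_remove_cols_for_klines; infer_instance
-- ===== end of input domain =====

-- B replaces A's build-a-removal-list-then-scan-and-remove structure by a single stateful pass
-- with two 'already removed' flags. A mutates its argument in place; the equivalence proved here
-- is about the RETURN value only (B performs the same in-place update via columns[:] = result).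

-- ===== PORT A =====
def remove_cols_for_klines (columns : List String) : List String :=
  let cols_to_remove :=
    columns.foldl
      (fun acc col => if PySem.Str.startswith col "ema" then acc ++ [col] else acc)
      ["symbol", "rsi"]
  cols_to_remove.foldl
    (fun cs col => if col ∈ cs then (PySem.List.remove? cs col).getD cs else cs)
    columns

-- ===== PORT B =====
-- loop body of B's single pass: state = (removed_symbol, removed_rsi, result)
def pvBstep (st : Bool × Bool × List String) (col : String) : Bool × Bool × List String :=
  if PySem.Str.startswith col "ema" then st
  else if col == "symbol" && !st.1 then (true, st.2.1, st.2.2)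
  else if col == "rsi" && !st.2.1 then (st.1, true, st.2.2)
  else (st.1, st.2.1, st.2.2 ++ [col])

def remove_cols_for_klines_alt (columns : List String) : List String :=
  let st := columns.foldl pvBstep (false, false, [])
  st.2.2

-- ===== PRECONDITION & SPEC =====
def Spec_remove_cols_for_klines (columns : List String) (out : List String) : Prop := out = remove_cols_for_klines_alt columns
instance (columns : List String) (out : List String) : Decidable (Spec_remove_cols_for_klines columns out) := by unfold Spec_remove_cols_for_klines; infer_instance

-- ===== CLAIM (what is proved, stated in full; the proofs are below) =====
def Claim_equal_remove_cols_for_klines : Prop := ∀ (columns : List String), Dom_remove_cols_for_klines columns → Spec_remove_cols_for_klines columns (remove_cols_for_klines columns)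

-- ===== LEMMAS AND PROOFS =====

-- the predicate "starts with 'ema'"
def pvEma (c : String) : Bool := PySem.Str.startswith c "ema"

-- A's removal step is exactly List.erase
theorem pv_step_erase (cs : List String) (col : String) :
    (if col ∈ cs then (PySem.List.remove? cs col).getD cs else cs) = cs.erase col := by
  by_cases h : col ∈ cs
  · simp [h, PySem.List.remove?_eq_some_erase]
  · simp [h, List.erase_of_not_mem h]

-- erasing an element that fails p does not change the p-filter
theorem pv_filter_erase_neg {p : String → Bool} {a : String} (ha : p a = false)
    (m : List String) : (m.erase a).filter p = m.filter p := by
  induction m with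
  | nil => simp
  | cons b t ih =>
    by_cases hb : b = a
    · subst hb; simp [List.erase_cons, ha]
    · simp [List.erase_cons, hb, List.filter_cons]
      by_cases hpb : p b <;> simp [hpb, ih]

-- filtering commutes with erasing an element that satisfies p
theorem pv_filter_erase_pos {p : String → Bool} {a : String} (ha : p a = true)
    (m : List String) : (m.erase a).filter p = (m.filter p).erase a := by
  induction m with
  | nil => simp
  | cons b t ih =>
    by_cases hb : b = a
    · subst hb; simp [List.erase_cons, ha]
    · by_cases hpb : p b
      · simp [List.erase_cons, hb, List.filter_cons, hpb, ih]
      · simp [List.erase_cons, hb, List.filter_cons, hpb, ih]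

-- folding erase over L leaves a fixed head a untouched when no element of L equals a
theorem pv_foldl_erase_cons {a : String} (t : List String) (L : List String)
    (h : ∀ x ∈ L, x ≠ a) :
    L.foldl (fun cs col => cs.erase col) (a :: t) =
      a :: L.foldl (fun cs col => cs.erase col) t := by
  induction L generalizing t with
  | nil => rfl
  | cons x L ih =>
    have hxa : x ≠ a := h x (List.mem_cons_self ..)
    simp only [List.foldl_cons, List.erase_cons]
    rw [if_neg (by simpa [beq_iff_eq] using fun e => hxa e.symm)]
    exact ih (t.erase x) (fun y hy => h y (List.mem_cons_of_mem _ hy))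

-- folding erase over exactly the p-elements of m removes exactly them
theorem pv_foldl_erase_filter (p : String → Bool) (m : List String) :
    (m.filter p).foldl (fun cs col => cs.erase col) m =
      m.filter (fun x => !p x) := by
  induction m with
  | nil => rfl
  | cons a t ih =>
    by_cases hpa : p a
    · simp only [List.filter_cons, hpa, if_pos, List.foldl_cons, List.erase_cons_head]
      simpa [List.filter_cons, hpa] using ih
    · have hpa' : p a = false := by simpa using hpa
      have hne : ∀ x ∈ t.filter p, x ≠ a := by
        intro x hx he
        have := List.of_mem_filter hx
        rw [he, hpa'] at this; exact Bool.noConfusion this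
      rw [show (a :: t).filter p = t.filter p by simp [List.filter_cons, hpa']]
      rw [pv_foldl_erase_cons t _ hne, ih]
      simp [List.filter_cons, hpa']

-- characterisation of A: erase first 'symbol', first 'rsi', then all 'ema*' elements
theorem pv_A_eq (l : List String) :
    remove_cols_for_klines l =
      ((l.filter (fun c => !pvEma c)).erase "symbol").erase "rsi" := by
  unfold remove_cols_for_klines
  rw [PySem.List.foldl_append_if_eq_filter]
  have hsteps : (fun (cs : List String) col =>
      if col ∈ cs then (PySem.List.remove? cs col).getD cs else cs) =
      (fun (cs : List String) col => cs.erase col) := by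
    funext cs col; exact pv_step_erase cs col
  rw [hsteps]
  simp only [List.cons_append, List.nil_append, List.foldl_cons]
  have hfilt : (((l.erase "symbol").erase "rsi").filter pvEma) = l.filter pvEma := by
    rw [pv_filter_erase_neg (a := "rsi") (by decide), pv_filter_erase_neg (a := "symbol") (by decide)]
  have goal : (l.filter pvEma).foldl (fun cs col => cs.erase col)
      ((l.erase "symbol").erase "rsi") =
      ((l.filter (fun c => !pvEma c)).erase "symbol").erase "rsi" := by
    rw [← hfilt, pv_foldl_erase_filter,
        pv_filter_erase_pos (a := "rsi") (by decide),
        pv_filter_erase_pos (a := "symbol") (by decide)]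
  exact goal

-- the value B's fold computes from flags (ss, sr)
def pvE (l : List String) (ss sr : Bool) : List String :=
  let f := l.filter (fun c => !pvEma c)
  let f1 := if ss then f else f.erase "symbol"
  if sr then f1 else f1.erase "rsi"

theorem pv_B_fold (l : List String) : ∀ (ss sr : Bool) (acc : List String),
    (l.foldl pvBstep (ss, sr, acc)).2.2 = acc ++ pvE l ss sr := by
  induction l with
  | nil => intro ss sr acc; simp [pvE]
  | cons a t ih =>
    intro ss sr acc
    simp only [List.foldl_cons]
    by_cases hea : PySem.Str.startswith a "ema"
    · have heaC : PySem.Chars.startswith a.toList ['e','m','a'] = true := by simpa using hea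
      have hs : pvBstep (ss, sr, acc) a = (ss, sr, acc) := by simp [pvBstep, heaC]
      rw [hs, ih]
      simp [pvE, List.filter_cons, pvEma, heaC]
    · have hea' : pvEma a = false := by simpa [pvEma] using hea
      have heaC : PySem.Chars.startswith a.toList ['e','m','a'] = false := by
        simpa [pvEma, PySem.Str.startswith_eq] using hea'
      have hcsym : PySem.Chars.startswith ['s','y','m','b','o','l'] ['e','m','a'] = false := by decide
      have hcrsi : PySem.Chars.startswith ['r','s','i'] ['e','m','a'] = false := by decide
      by_cases hsym : a = "symbol"
      · subst hsym
        cases ss with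
        | false =>
          have hs : pvBstep (false, sr, acc) "symbol" = (true, sr, acc) := by
            simp [pvBstep, hcsym]
          rw [hs, ih]
          cases sr <;> simp [pvE, List.filter_cons, pvEma, hcsym, List.erase_cons]
        | true =>
          have hs : pvBstep (true, sr, acc) "symbol" = (true, sr, acc ++ ["symbol"]) := by
            simp [pvBstep, hcsym]
          rw [hs, ih]
          cases sr <;> simp [pvE, List.filter_cons, pvEma, hcsym, List.erase_cons, List.append_assoc]
      · by_cases hrsi : a = "rsi"
        · subst hrsi
          cases sr with
          | false =>
            have hs : pvBstep (ss, false, acc) "rsi" = (ss, true, acc) := by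
              cases ss <;> simp [pvBstep, hcrsi]
            rw [hs, ih]
            cases ss <;> simp [pvE, List.filter_cons, pvEma, hcrsi, List.erase_cons]
          | true =>
            have hs : pvBstep (ss, true, acc) "rsi" = (ss, true, acc ++ ["rsi"]) := by
              cases ss <;> simp [pvBstep, hcrsi]
            rw [hs, ih]
            cases ss <;> simp [pvE, List.filter_cons, pvEma, hcrsi, List.erase_cons, List.append_assoc]
        · have hs : pvBstep (ss, sr, acc) a = (ss, sr, acc ++ [a]) := by
            simp [pvBstep, heaC, hsym, hrsi]
          rw [hs, ih]
          cases ss <;> cases sr <;>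
            simp [pvE, List.filter_cons, pvEma, heaC, List.erase_cons, hsym, hrsi,
              List.append_assoc]

theorem pv_B_eq (l : List String) :
    remove_cols_for_klines_alt l =
      ((l.filter (fun c => !pvEma c)).erase "symbol").erase "rsi" := by
  unfold remove_cols_for_klines_alt
  rw [pv_B_fold l false false []]
  simp [pvE]

-- ===== VERDICT (by name: the statement is the Claim_ definition above) =====
theorem remove_cols_for_klines_spec : Claim_equal_remove_cols_for_klines := by
  intro columns _
  unfold Spec_remove_cols_for_klines
  rw [pv_A_eq, pv_B_eq]
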